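-- pv_equiv track=rewrite | github.com/bostanSergei/leetcode.com | 2441_largest_positive_integer_that_exists_with_its_negative.py | findMaxK
-- ===== SOURCE A (Python) =====
-- def findMaxK(nums: list) -> int:
--     numbers_dict: dict = {}
--     for number in nums:
--         if (cur_num := abs(number)) not in numbers_dict:
--             numbers_dict[cur_num] = set()
--         numbers_dict[cur_num].add(number)
--
--     max_num = -1
--     for key, value in numbers_dict.items():
--         if len(value) == 2:
--             if key > max_num:
--                 max_num = key
--
--     return max_num
-- ===== SOURCE B (Python) =====
-- def findMaxK(nums: list) -> int:
--     seen = set()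
--     ans = -1
--     for n in nums:
--         if n != 0 and -n in seen:
--             ans = max(ans, abs(n))
--         seen.add(n)
--     return ans
-- ===== Notes on version B (the rewrite author's own statement) =====
-- stated objective: simpler
-- what changed: Replaced the dict-of-signed-sets grouping plus a second scan over dict items with a single pass that keeps one flat 'seen' set and a running maximum updated when the negation was already seen.
import Mathlib
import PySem

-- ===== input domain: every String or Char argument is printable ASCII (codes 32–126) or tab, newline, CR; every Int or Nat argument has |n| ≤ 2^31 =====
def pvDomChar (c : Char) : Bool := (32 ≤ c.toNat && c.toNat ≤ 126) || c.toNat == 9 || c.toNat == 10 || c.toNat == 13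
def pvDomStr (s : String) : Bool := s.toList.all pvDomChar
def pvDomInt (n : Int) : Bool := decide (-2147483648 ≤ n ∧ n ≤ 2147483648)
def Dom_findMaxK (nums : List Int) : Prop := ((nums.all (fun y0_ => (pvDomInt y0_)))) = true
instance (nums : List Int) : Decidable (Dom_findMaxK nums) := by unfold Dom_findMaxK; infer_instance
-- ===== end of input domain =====

-- B replaces A's dict-of-signed-sets grouping + second scan by one pass over a flat 'seen' set with a running maximum (objective: simpler).

-- ===== PORT A =====
-- body of A's first loop: ensure the key |number| exists, then add number to its set
def findMaxKStep (d : PySem.Dict Int (PySem.Set Int)) (number : Int) : PySem.Dict Int (PySem.Set Int) :=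
  let cur_num := |number|
  let d := if d.contains cur_num then d else d.insert cur_num PySem.Set.empty
  d.modify cur_num PySem.Set.empty (fun s => PySem.Set.add s number)

def findMaxK (nums : List Int) : Int :=
  let numbers_dict := nums.foldl findMaxKStep PySem.Dict.empty
  numbers_dict.items.foldl
    (fun max_num kv =>
      if PySem.Set.len kv.2 = 2 then (if kv.1 > max_num then kv.1 else max_num) else max_num)
    (-1)

-- ===== PORT B =====
def findMaxK_alt (nums : List Int) : Int :=
  (nums.foldl
    (fun st n =>
      let ans := if n ≠ 0 ∧ PySem.Set.contains st.1 (-n) then max st.2 |n| else st.2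
      (PySem.Set.add st.1 n, ans))
    ((PySem.Set.empty : PySem.Set Int), (-1 : Int))).2

-- ===== PRECONDITION & SPEC =====
def Spec_findMaxK (nums : List Int) (out : Int) : Prop := out = findMaxK_alt nums
instance (nums : List Int) (out : Int) : Decidable (Spec_findMaxK nums out) := by unfold Spec_findMaxK; infer_instance

-- ===== CLAIM (what is proved, stated in full; the proofs are below) =====
def Claim_equal_findMaxK : Prop := ∀ (nums : List Int), Dom_findMaxK nums → Spec_findMaxK nums (findMaxK nums)

-- ===== LEMMAS AND PROOFS =====

-- k is a valid answer candidate: positive and present together with its negative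
def pvGood (nums : List Int) (k : Int) : Prop := 0 < k ∧ k ∈ nums ∧ -k ∈ nums

-- characterization of the common result
def pvChar (nums : List Int) (r : Int) : Prop :=
  (∀ k, pvGood nums k → k ≤ r) ∧ (r = -1 ∨ pvGood nums r)

theorem pvChar_unique {nums : List Int} {r₁ r₂ : Int}
    (h₁ : pvChar nums r₁) (h₂ : pvChar nums r₂) : r₁ = r₂ := by
  obtain ⟨hb₁, hc₁⟩ := h₁
  obtain ⟨hb₂, hc₂⟩ := h₂
  rcases hc₁ with h1 | g1 <;> rcases hc₂ with h2 | g2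
  · omega
  · have := hb₁ _ g2; have := g2.1; omega
  · have := hb₂ _ g1; have := g1.1; omega
  · have := hb₁ _ g2; have := hb₂ _ g1; omega

theorem pvGood_append {p : List Int} {n k : Int} :
    pvGood (p ++ [n]) k ↔ pvGood p k ∨ (k = |n| ∧ n ≠ 0 ∧ -n ∈ p) := by
  unfold pvGood
  simp only [List.mem_append, List.mem_singleton]
  rcases abs_cases n with ⟨habs, hsgn⟩ | ⟨habs, hsgn⟩
  · constructor
    · rintro ⟨hk, hm, hn⟩
      have hn' : -k ∈ p := by
        rcases hn with h | h
        · exact h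
        · exact absurd h (by omega)
      rcases hm with h | h
      · exact Or.inl ⟨hk, h, hn'⟩
      · subst h
        exact Or.inr ⟨by omega, by omega, hn'⟩
    · rintro (⟨hk, h1, h2⟩ | ⟨hkn, hn0, hmem⟩)
      · exact ⟨hk, Or.inl h1, Or.inl h2⟩
      · refine ⟨by omega, Or.inr (by omega), Or.inl ?_⟩
        have he : -k = -n := by omega
        rw [he]; exact hmem
  · constructor
    · rintro ⟨hk, hm, hn⟩
      have hm' : k ∈ p := by
        rcases hm with h | h
        · exact h
        · exact absurd h (by omega)
      rcases hn with h | h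
      · exact Or.inl ⟨hk, hm', h⟩
      · refine Or.inr ⟨by omega, by omega, ?_⟩
        have he : -n = k := by omega
        rw [he]; exact hm'
    · rintro (⟨hk, h1, h2⟩ | ⟨hkn, hn0, hmem⟩)
      · exact ⟨hk, Or.inl h1, Or.inl h2⟩
      · refine ⟨by omega, Or.inl ?_, Or.inr (by omega)⟩
        have he : k = -n := by omega
        rw [he]; exact hmem

-- ===== B satisfies pvChar =====

theorem pvB_loop (rest : List Int) : ∀ (p : List Int) (a : Int),
    pvChar p a →
    pvChar (p ++ rest)
      ((rest.foldl
        (fun st n =>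
          let ans := if n ≠ 0 ∧ PySem.Set.contains st.1 (-n) then max st.2 |n| else st.2
          (PySem.Set.add st.1 n, ans))
        ((PySem.Set.ofList p : PySem.Set Int), a)).2) := by
  induction rest with
  | nil => intro p a h; simpa using h
  | cons n rest ih =>
    intro p a h
    have hmem : (PySem.Set.contains (PySem.Set.ofList p) (-n) = true) ↔ -n ∈ p := by
      rw [PySem.Set.contains_iff, PySem.Set.mem_ofList]

    have hadd : PySem.Set.add (PySem.Set.ofList p) n = PySem.Set.ofList (p ++ [n]) :=
      (PySem.Set.ofList_append_singleton p n).symm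
    have h' : pvChar (p ++ [n])
        (if n ≠ 0 ∧ PySem.Set.contains (PySem.Set.ofList p) (-n) then max a |n| else a) := by
      obtain ⟨hb, hc⟩ := h
      split_ifs with hcond
      · obtain ⟨hn0, hseen⟩ := hcond
        rw [hmem] at hseen
        constructor
        · intro k hk
          rw [pvGood_append] at hk
          rcases hk with hk | ⟨rfl, _, _⟩
          · exact le_trans (hb _ hk) (le_max_left _ _)
          · exact le_max_right _ _
        · rcases max_cases a |n| with ⟨he, _⟩ | ⟨he, _⟩
          · rw [he]
            rcases hc with rfl | g
            · have hpos : (0:Int) < |n| := abs_pos.mpr hn0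
              omega
            · exact Or.inr (pvGood_append.mpr (Or.inl g))
          · rw [he]
            exact Or.inr (pvGood_append.mpr (Or.inr ⟨rfl, hn0, hseen⟩))
      · constructor
        · intro k hk
          rw [pvGood_append] at hk
          rcases hk with hk | ⟨rfl, hn0, hneg⟩
          · exact hb _ hk
          · exact absurd ⟨hn0, hmem.mpr hneg⟩ hcond
        · rcases hc with rfl | g
          · exact Or.inl rfl
          · exact Or.inr (pvGood_append.mpr (Or.inl g))
    have := ih (p ++ [n]) _ h'
    simpa only [List.foldl_cons, hadd, List.append_assoc, List.cons_append, List.nil_append]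
      using this

theorem pvChar_B (nums : List Int) : pvChar nums (findMaxK_alt nums) := by
  have h0 : pvChar [] (-1) := by
    constructor
    · rintro k ⟨_, hk, _⟩; simp at hk
    · exact Or.inl rfl
  have := pvB_loop nums [] (-1) h0
  simpa only [findMaxK_alt, PySem.Set.ofList_nil, List.nil_append] using this

-- ===== A satisfies pvChar =====

theorem pvStep_getD (d : PySem.Dict Int (PySem.Set Int)) (n k : Int) :
    (findMaxKStep d n).getD k PySem.Set.empty =
      if |n| = k then PySem.Set.add (d.getD k PySem.Set.empty) n
      else d.getD k PySem.Set.empty := by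
  unfold findMaxKStep
  by_cases hc : d.contains |n| = true
  · simp only [hc, if_true]
    rw [PySem.Dict.getD_modify]
    by_cases hk : k = |n|
    · rw [if_pos hk, if_pos hk.symm, hk]
    · rw [if_neg hk, if_neg (fun h => hk h.symm)]
  · simp only [hc, if_false, Bool.false_eq_true]
    rw [PySem.Dict.getD_modify]
    by_cases hk : k = |n|
    · rw [if_pos hk, if_pos hk.symm, hk, PySem.Dict.getD_insert_self,
        PySem.Dict.getD_of_not_contains d _ (by simpa using hc)]
    · rw [if_neg hk, if_neg (fun h => hk h.symm), PySem.Dict.getD_insert, if_neg hk]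

theorem pvA_dict_getD (p : List Int) : ∀ (d : PySem.Dict Int (PySem.Set Int)) (k : Int),
    (p.foldl findMaxKStep d).getD k PySem.Set.empty =
      (p.filter (fun n => |n| == k)).foldl PySem.Set.add (d.getD k PySem.Set.empty) := by
  induction p with
  | nil => intro d k; simp
  | cons n p ih =>
    intro d k
    rw [List.foldl_cons, ih, pvStep_getD, List.filter_cons]
    by_cases h : |n| = k <;> simp [h]

theorem pvStep_keys (d : PySem.Dict Int (PySem.Set Int)) (n : Int) :
    (findMaxKStep d n).keys = if d.contains |n| = true then d.keys else d.keys ++ [|n|] := by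
  unfold findMaxKStep
  by_cases hc : d.contains |n| = true
  · simp only [hc, if_true]
    rw [PySem.Dict.keys_modify, PySem.Dict.keys_insert_of_contains d _ hc]
  · simp only [hc, if_false, Bool.false_eq_true]
    rw [PySem.Dict.keys_modify,
      PySem.Dict.keys_insert_of_contains _ _ (PySem.Dict.contains_insert_self d |n| _),
      PySem.Dict.keys_insert_of_not_contains d _ (by simpa using hc)]

theorem pvA_dict_keys (p : List Int) : ∀ (d : PySem.Dict Int (PySem.Set Int)),
    d.keys.Nodup →
    ((p.foldl findMaxKStep d).keys.Nodup ∧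
      ∀ k, k ∈ (p.foldl findMaxKStep d).keys ↔ (k ∈ d.keys ∨ ∃ n ∈ p, |n| = k)) := by
  induction p with
  | nil => intro d hd; simpa using hd
  | cons n p ih =>
    intro d hd
    have hstep := pvStep_keys d n
    have hnd : (findMaxKStep d n).keys.Nodup := by
      rw [hstep]; split_ifs with hc
      · exact hd
      · rw [List.nodup_append]
        refine ⟨hd, List.nodup_singleton _, ?_⟩
        intro a ha b hb
        rw [List.mem_singleton] at hb
        subst hb
        intro h
        subst h
        exact hc ((PySem.Dict.contains_iff_mem_keys d _).mpr ha)
    have hmem : ∀ k, k ∈ (findMaxKStep d n).keys ↔ (k ∈ d.keys ∨ k = |n|) := by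
      intro k
      rw [hstep]; split_ifs with hc
      · constructor
        · exact Or.inl
        · rintro (h | rfl)
          · exact h
          · exact (PySem.Dict.contains_iff_mem_keys d _).mp hc
      · simp [List.mem_append]
    obtain ⟨h1, h2⟩ := ih (findMaxKStep d n) hnd
    refine ⟨h1, ?_⟩
    intro k
    rw [List.foldl_cons] at *
    rw [h2 k, hmem k]
    constructor
    · rintro ((h | rfl) | ⟨m, hm, rfl⟩)
      · exact Or.inl h
      · exact Or.inr ⟨n, by simp⟩
      · exact Or.inr ⟨m, by simp [hm]⟩
    · rintro (h | ⟨m, hm, rfl⟩)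
      · exact Or.inl (Or.inl h)
      · rcases List.mem_cons.mp hm with rfl | hm'
        · exact Or.inl (Or.inr rfl)
        · exact Or.inr ⟨m, hm', rfl⟩

-- the group of k: set of elements of nums with |n| = k; its size is 2 iff k is good (for k ≥ 0)
theorem pvLen_group (nums : List Int) (k : Int) (hk : 0 ≤ k) :
    (PySem.Set.len ((nums.filter (fun n => |n| == k)).foldl PySem.Set.add PySem.Set.empty) = 2)
      ↔ pvGood nums k := by
  set l := nums.filter (fun n => |n| == k) with hl
  have hS : (l.foldl PySem.Set.add PySem.Set.empty) = PySem.Set.ofList l :=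
    (PySem.Set.ofList_eq_foldl l).symm
  rw [hS]
  set S := PySem.Set.ofList l with hSdef
  have hnd : S.Nodup := PySem.Set.nodup_ofList l
  have hmem : ∀ x, x ∈ S ↔ (x ∈ nums ∧ |x| = k) := by
    intro x
    rw [hSdef, PySem.Set.mem_ofList, hl, List.mem_filter]
    simp
  have hsub : ∀ x ∈ S, x = k ∨ x = -k := by
    intro x hx
    have := (hmem x).mp hx
    rcases abs_cases x with ⟨h, _⟩ | ⟨h, _⟩ <;> omega
  have hgood : pvGood nums k ↔ (k ∈ S ∧ -k ∈ S ∧ k ≠ 0) := by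
    unfold pvGood
    rw [hmem, hmem]
    constructor
    · rintro ⟨h1, h2, h3⟩
      exact ⟨⟨h2, abs_of_pos h1⟩, ⟨h3, by rw [abs_neg]; exact abs_of_pos h1⟩, by omega⟩
    · rintro ⟨⟨h1, _⟩, ⟨h2, _⟩, h3⟩
      exact ⟨by omega, h1, h2⟩
  rw [hgood]
  have hlen : PySem.Set.len S = ((S : List Int).length : Int) := rfl
  rw [hlen, show ((2:Int) = ((2:Nat):Int)) from rfl, Nat.cast_inj]
  clear hS hSdef hmem hl hgood
  match S, hnd, hsub with
  | [], _, _ => simp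
  | [a], hnd, hsub =>
    simp only [List.length_singleton, List.mem_singleton]
    constructor
    · omega
    · rintro ⟨rfl, h2, h3⟩; omega
  | [a, b], hnd, hsub =>
    have hab : a ≠ b := by simp [List.nodup_cons] at hnd; tauto
    have ha := hsub a (by simp)
    have hb := hsub b (by simp)
    simp only [List.length_cons, List.length_nil, List.mem_cons,
      List.not_mem_nil, or_false]
    constructor
    · intro _
      rcases ha with rfl | rfl <;> rcases hb with h | h <;> omega
    · intro _; trivial
  | a :: b :: c :: t, hnd, hsub =>
    exfalso
    have ha := hsub a (by simp)
    have hb := hsub b (by simp)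
    have hc := hsub c (by simp)
    simp only [List.nodup_cons, List.mem_cons] at hnd
    have hab : a ≠ b := by tauto
    have hac : a ≠ c := by tauto
    have hbc : b ≠ c := by tauto
    omega

-- folding A's second loop over a key list yields pvChar
theorem pvA_fold (nums : List Int) (c : Int → Prop) [DecidablePred c] (ks : List Int) :
    ∀ a : Int, -1 ≤ a → (a = -1 ∨ pvGood nums a) →
    (∀ k, pvGood nums k → k ≤ a ∨ k ∈ ks) →
    (∀ k ∈ ks, (c k ↔ pvGood nums k)) →
    pvChar nums (ks.foldl (fun m k => if c k then (if k > m then k else m) else m) a) := by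
  induction ks with
  | nil =>
    intro a _ hg hcov _
    exact ⟨fun k hk => (hcov k hk).elim id (by simp), hg⟩
  | cons k ks ih =>
    intro a ha hg hcov hc
    rw [List.foldl_cons]
    set a' := if c k then (if k > a then k else a) else a with ha'
    have haa' : a ≤ a' := by
      rw [ha']; split_ifs <;> omega
    apply ih a' (by omega)
    · rw [ha']
      split_ifs with h1 h2
      · exact Or.inr ((hc k (by simp)).mp h1)
      · exact hg
      · exact hg
    · intro k' hk'
      rcases hcov k' hk' with h | h
      · exact Or.inl (by omega)
      · rcases List.mem_cons.mp h with rfl | h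
        · left
          have hck : c k' := (hc k' (by simp)).mpr hk'
          rw [ha', if_pos hck]
          split_ifs <;> omega
        · exact Or.inr h
    · intro k' hk'
      exact hc k' (List.mem_cons_of_mem _ hk')

theorem pvChar_A (nums : List Int) : pvChar nums (findMaxK nums) := by
  obtain ⟨hnd, hkeys⟩ := pvA_dict_keys nums PySem.Dict.empty (by
    rw [PySem.Dict.keys_empty]; exact List.nodup_nil)
  set D := nums.foldl findMaxKStep PySem.Dict.empty with hD
  have hrfl : findMaxK nums =
      D.items.foldl
        (fun max_num kv =>
          if PySem.Set.len kv.2 = 2 then (if kv.1 > max_num then kv.1 else max_num) else max_num)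
        (-1) := rfl
  rw [hrfl, PySem.Dict.items_eq_map_keys D (hD ▸ hnd) PySem.Set.empty, List.foldl_map]
  have hkeys' : ∀ k, k ∈ D.keys ↔ ∃ n ∈ nums, |n| = k := by
    intro k; rw [hD, hkeys k, PySem.Dict.keys_empty]; simp
  have hget : ∀ k, D.getD k PySem.Set.empty =
      (nums.filter (fun n => |n| == k)).foldl PySem.Set.add PySem.Set.empty := by
    intro k; rw [hD, pvA_dict_getD nums PySem.Dict.empty k, PySem.Dict.getD_empty]
  apply pvA_fold nums (fun k => PySem.Set.len (D.getD k PySem.Set.empty) = 2) D.keys (-1)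
    le_rfl (Or.inl rfl)
  · intro k hk
    right
    rw [hkeys' k]
    exact ⟨k, hk.2.1, abs_of_pos hk.1⟩
  · intro k hk
    have hk0 : 0 ≤ k := by
      obtain ⟨n, _, rfl⟩ := (hkeys' k).mp hk
      exact abs_nonneg n
    rw [hget k]
    exact pvLen_group nums k hk0

-- ===== VERDICT (by name: the statement is the Claim_ definition above) =====
theorem findMaxK_spec : Claim_equal_findMaxK := by
  intro nums _
  exact pvChar_unique (pvChar_A nums) (pvChar_B nums)
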